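-- pv_equiv track=rewrite | github.com/Madhan2006p/AutoCertificationGen | backend/db_refresh.py | find_best_name_column
-- ===== SOURCE A (Python) =====
-- def find_best_name_column(record, roll_col_name):
--     """
--     Find the corresponding name column for a given roll number column.
--     Same logic as in generate_participation.py
--     """
--     headers = list(record.keys())
--
--     roll_lower = roll_col_name.lower()
--
--     # Specific mappings
--     if "leader" in roll_lower:
--         for h in headers:
--             if "leader" in h.lower() and "name" in h.lower() and h != roll_col_name: return h
--     if "team member 1" in roll_lower or "member 1" in roll_lower:
--         for h in headers:
--             if "member 1" in h.lower() and "name" in h.lower() and h != roll_col_name: return h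
--     if "team member 2" in roll_lower or "member 2" in roll_lower:
--         for h in headers:
--             if "member 2" in h.lower() and "name" in h.lower() and h != roll_col_name: return h
--
--     # Generic mappings
--     priority_names = ["Name with initial (eg:Anu A)", "Name", "Student Name", "Full Name"]
--     for p in priority_names:
--         if p in headers: return p
--
--     for h in headers:
--         if "name" in h.lower() and "team" not in h.lower() and "file" not in h.lower(): return h
--     return None
-- ===== SOURCE B (Python) =====
-- PRIORITY = ["Name with initial (eg:Anu A)", "Name", "Student Name", "Full Name"]
--
-- def find_best_name_column(record, roll_col_name):
--     """Single pass over the dict keys with one accumulator per mapping rule,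
--     instead of A's up-to-four separate scans over the header list."""
--     rl = roll_col_name.lower()
--     t0 = "leader" in rl
--     t1 = "team member 1" in rl or "member 1" in rl
--     t2 = "team member 2" in rl or "member 2" in rl
--     o0 = o1 = o2 = o4 = None
--     for h in record:                      # dict keys, insertion order
--         hl = h.lower()
--         if "name" in hl:                  # every rule requires "name"
--             if o0 is None and t0 and "leader" in hl and h != roll_col_name:
--                 o0 = h
--             if o1 is None and t1 and "member 1" in hl and h != roll_col_name:
--                 o1 = h
--             if o2 is None and t2 and "member 2" in hl and h != roll_col_name:
--                 o2 = h
--             if o4 is None and "team" not in hl and "file" not in hl: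
--                 o4 = h
--     if o0 is not None: return o0
--     if o1 is not None: return o1
--     if o2 is not None: return o2
--     for p in PRIORITY:
--         if p in record: return p
--     return o4
-- ===== Notes on version B (the rewrite author's own statement) =====
-- stated objective: alternative
-- what changed: A makes up to four separate scans over the header list (one per mapping rule plus the generic fallback); B makes a single pass over the dict keys maintaining one first-match accumulator per rule and resolves the rule priority (and the constant priority-names membership check) afterwards.
import Mathlib
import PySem

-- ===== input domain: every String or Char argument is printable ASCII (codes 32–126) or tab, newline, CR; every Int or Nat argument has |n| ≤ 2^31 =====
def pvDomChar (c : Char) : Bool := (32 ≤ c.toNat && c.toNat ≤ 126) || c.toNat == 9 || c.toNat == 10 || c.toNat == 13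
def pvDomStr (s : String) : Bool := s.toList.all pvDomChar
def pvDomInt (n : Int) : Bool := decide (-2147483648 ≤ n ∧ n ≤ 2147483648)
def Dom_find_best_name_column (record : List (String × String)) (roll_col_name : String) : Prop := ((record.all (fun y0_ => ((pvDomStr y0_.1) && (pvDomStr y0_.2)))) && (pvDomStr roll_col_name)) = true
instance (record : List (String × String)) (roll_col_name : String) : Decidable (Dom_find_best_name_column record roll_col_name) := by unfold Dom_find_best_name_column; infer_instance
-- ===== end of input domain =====

-- B fuses A's up-to-four separate header scans into ONE pass over the dict keys with an
-- accumulator per mapping rule (alternative decomposition; same results).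

-- ===== PORT A =====
-- literal transliteration: headers = record.keys() (dict keys = first occurrences), then
-- three specific-mapping if-blocks, the priority membership pass, and the generic fallback scan.
def find_best_name_column (record : List (String × String)) (roll_col_name : String) : Option String :=
  let headers := PySem.List.dedup (record.map Prod.fst)
  let roll_lower := PySem.Str.lower roll_col_name
  match (if PySem.Str.isIn "leader" roll_lower then
           headers.find? (fun h => PySem.Str.isIn "leader" (PySem.Str.lower h) &&
             PySem.Str.isIn "name" (PySem.Str.lower h) && h != roll_col_name)
         else none) with
  | some h => some h
  | none =>
  match (if PySem.Str.isIn "team member 1" roll_lower || PySem.Str.isIn "member 1" roll_lower then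
           headers.find? (fun h => PySem.Str.isIn "member 1" (PySem.Str.lower h) &&
             PySem.Str.isIn "name" (PySem.Str.lower h) && h != roll_col_name)
         else none) with
  | some h => some h
  | none =>
  match (if PySem.Str.isIn "team member 2" roll_lower || PySem.Str.isIn "member 2" roll_lower then
           headers.find? (fun h => PySem.Str.isIn "member 2" (PySem.Str.lower h) &&
             PySem.Str.isIn "name" (PySem.Str.lower h) && h != roll_col_name)
         else none) with
  | some h => some h
  | none =>
  match ["Name with initial (eg:Anu A)", "Name", "Student Name", "Full Name"].find?
          (fun p => headers.contains p) with
  | some p => some p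
  | none =>
    headers.find? (fun h => PySem.Str.isIn "name" (PySem.Str.lower h) &&
      !PySem.Str.isIn "team" (PySem.Str.lower h) && !PySem.Str.isIn "file" (PySem.Str.lower h))

-- ===== PORT B =====
def pvPriority : List String := ["Name with initial (eg:Anu A)", "Name", "Student Name", "Full Name"]

-- the loop body of Source B: update the four first-match accumulators for one key h
def pvStep (t0 t1 t2 : Bool) (roll : String)
    (acc : Option String × Option String × Option String × Option String) (h : String) :
    Option String × Option String × Option String × Option String :=
  let hl := PySem.Str.lower h
  if PySem.Str.isIn "name" hl then
    ((if acc.1.isNone && (t0 && PySem.Str.isIn "leader" hl && h != roll) then some h else acc.1),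
     (if acc.2.1.isNone && (t1 && PySem.Str.isIn "member 1" hl && h != roll) then some h else acc.2.1),
     (if acc.2.2.1.isNone && (t2 && PySem.Str.isIn "member 2" hl && h != roll) then some h else acc.2.2.1),
     (if acc.2.2.2.isNone && (!PySem.Str.isIn "team" hl && !PySem.Str.isIn "file" hl) then some h else acc.2.2.2))
  else acc

def find_best_name_column_alt (record : List (String × String)) (roll_col_name : String) : Option String :=
  let keys := PySem.List.dedup (record.map Prod.fst)
  let rl := PySem.Str.lower roll_col_name
  let t0 := PySem.Str.isIn "leader" rl
  let t1 := PySem.Str.isIn "team member 1" rl || PySem.Str.isIn "member 1" rl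
  let t2 := PySem.Str.isIn "team member 2" rl || PySem.Str.isIn "member 2" rl
  let r := keys.foldl (pvStep t0 t1 t2 roll_col_name) (none, none, none, none)
  match r.1 with
  | some h => some h
  | none =>
  match r.2.1 with
  | some h => some h
  | none =>
  match r.2.2.1 with
  | some h => some h
  | none =>
  match pvPriority.find? (fun p => keys.contains p) with
  | some p => some p
  | none => r.2.2.2

-- ===== PRECONDITION & SPEC =====
def Spec_find_best_name_column (record : List (String × String)) (roll_col_name : String) (out : Option String) : Prop := out = find_best_name_column_alt record roll_col_name
instance (record : List (String × String)) (roll_col_name : String) (out : Option String) : Decidable (Spec_find_best_name_column record roll_col_name out) := by unfold Spec_find_best_name_column; infer_instance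

-- ===== CLAIM (what is proved, stated in full; the proofs are below) =====
def Claim_equal_find_best_name_column : Prop := ∀ (record : List (String × String)) (roll_col_name : String), Dom_find_best_name_column record roll_col_name → Spec_find_best_name_column record roll_col_name (find_best_name_column record roll_col_name)

-- ===== LEMMAS AND PROOFS =====

-- the per-rule predicates the accumulators compute first matches of
def pvQ0 (t0 : Bool) (roll : String) (h : String) : Bool :=
  PySem.Str.isIn "name" (PySem.Str.lower h) && (t0 && PySem.Str.isIn "leader" (PySem.Str.lower h) && h != roll)
def pvQ1 (t1 : Bool) (roll : String) (h : String) : Bool :=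
  PySem.Str.isIn "name" (PySem.Str.lower h) && (t1 && PySem.Str.isIn "member 1" (PySem.Str.lower h) && h != roll)
def pvQ2 (t2 : Bool) (roll : String) (h : String) : Bool :=
  PySem.Str.isIn "name" (PySem.Str.lower h) && (t2 && PySem.Str.isIn "member 2" (PySem.Str.lower h) && h != roll)
def pvQ4 (h : String) : Bool :=
  PySem.Str.isIn "name" (PySem.Str.lower h) && (!PySem.Str.isIn "team" (PySem.Str.lower h) && !PySem.Str.isIn "file" (PySem.Str.lower h))

-- one accumulator step, per component
def pvS (q : String → Bool) (a : Option String) (h : String) : Option String :=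
  if a.isNone && q h then some h else a

theorem pvStep_eq (t0 t1 t2 : Bool) (roll : String)
    (acc : Option String × Option String × Option String × Option String) (h : String) :
    pvStep t0 t1 t2 roll acc h =
      (pvS (pvQ0 t0 roll) acc.1 h, pvS (pvQ1 t1 roll) acc.2.1 h,
       pvS (pvQ2 t2 roll) acc.2.2.1 h, pvS pvQ4 acc.2.2.2 h) := by
  unfold pvStep pvS pvQ0 pvQ1 pvQ2 pvQ4
  by_cases hn : PySem.Chars.isIn ['n', 'a', 'm', 'e'] (PySem.Chars.lower h.toList) = true
  · simp [hn]
  · simp only [Bool.not_eq_true] at hn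
    simp [hn]

theorem pvS_or (q : String → Bool) (a : Option String) (h : String) (o : Option String) :
    (pvS q a h).or o = a.or (if q h then (some h).or o else o) := by
  unfold pvS
  cases a <;> cases hq : q h <;> simp

-- the single fused pass computes exactly the four first matches
theorem fold_char (t0 t1 t2 : Bool) (roll : String) :
    ∀ (hs : List String) (a0 a1 a2 a4 : Option String),
      hs.foldl (pvStep t0 t1 t2 roll) (a0, a1, a2, a4) =
        (a0.or (hs.find? (pvQ0 t0 roll)), a1.or (hs.find? (pvQ1 t1 roll)),
         a2.or (hs.find? (pvQ2 t2 roll)), a4.or (hs.find? pvQ4)) := by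
  intro hs
  induction hs with
  | nil => intro a0 a1 a2 a4; simp
  | cons h t ih =>
    intro a0 a1 a2 a4
    rw [List.foldl_cons, pvStep_eq, ih]
    have comp : ∀ (q : String → Bool) (a : Option String),
        (pvS q a h).or (t.find? q) = a.or ((h :: t).find? q) := by
      intro q a
      rw [List.find?_cons]
      cases hq : q h <;> simp [pvS_or, hq]
    rw [comp, comp, comp, comp]

-- a constant conjunct factors out of a find?
theorem find?_const_and (c : Bool) (p : String → Bool) (hs : List String) :
    hs.find? (fun h => c && p h) = if c then hs.find? p else none := by
  cases c
  · simp [List.find?_eq_none]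
  · simp

-- ===== VERDICT (by name: the statement is the Claim_ definition above) =====
theorem find_best_name_column_spec : Claim_equal_find_best_name_column := by
  intro record roll_col_name _
  unfold Spec_find_best_name_column find_best_name_column find_best_name_column_alt
  simp only [fold_char, Option.none_or]
  have e0 : (PySem.List.dedup (record.map Prod.fst)).find?
      (pvQ0 (PySem.Str.isIn "leader" (PySem.Str.lower roll_col_name)) roll_col_name)
      = if PySem.Str.isIn "leader" (PySem.Str.lower roll_col_name) then
          (PySem.List.dedup (record.map Prod.fst)).find? (fun h =>
            PySem.Str.isIn "leader" (PySem.Str.lower h) &&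
            PySem.Str.isIn "name" (PySem.Str.lower h) && h != roll_col_name)
        else none := by
    rw [show pvQ0 (PySem.Str.isIn "leader" (PySem.Str.lower roll_col_name)) roll_col_name
        = (fun h => PySem.Str.isIn "leader" (PySem.Str.lower roll_col_name) &&
            (PySem.Str.isIn "leader" (PySem.Str.lower h) &&
             PySem.Str.isIn "name" (PySem.Str.lower h) && h != roll_col_name)) from
      funext fun h => by unfold pvQ0; cases PySem.Str.isIn "name" (PySem.Str.lower h) <;>
        cases PySem.Str.isIn "leader" (PySem.Str.lower h) <;>
        cases PySem.Str.isIn "leader" (PySem.Str.lower roll_col_name) <;>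
        cases h != roll_col_name <;> rfl]
    exact find?_const_and _ _ _
  have e1 : (PySem.List.dedup (record.map Prod.fst)).find?
      (pvQ1 (PySem.Str.isIn "team member 1" (PySem.Str.lower roll_col_name) ||
             PySem.Str.isIn "member 1" (PySem.Str.lower roll_col_name)) roll_col_name)
      = if PySem.Str.isIn "team member 1" (PySem.Str.lower roll_col_name) ||
           PySem.Str.isIn "member 1" (PySem.Str.lower roll_col_name) then
          (PySem.List.dedup (record.map Prod.fst)).find? (fun h =>
            PySem.Str.isIn "member 1" (PySem.Str.lower h) &&
            PySem.Str.isIn "name" (PySem.Str.lower h) && h != roll_col_name)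
        else none := by
    rw [show pvQ1 (PySem.Str.isIn "team member 1" (PySem.Str.lower roll_col_name) ||
             PySem.Str.isIn "member 1" (PySem.Str.lower roll_col_name)) roll_col_name
        = (fun h => (PySem.Str.isIn "team member 1" (PySem.Str.lower roll_col_name) ||
             PySem.Str.isIn "member 1" (PySem.Str.lower roll_col_name)) &&
            (PySem.Str.isIn "member 1" (PySem.Str.lower h) &&
             PySem.Str.isIn "name" (PySem.Str.lower h) && h != roll_col_name)) from
      funext fun h => by unfold pvQ1; cases PySem.Str.isIn "name" (PySem.Str.lower h) <;>
        cases PySem.Str.isIn "member 1" (PySem.Str.lower h) <;>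
        cases PySem.Str.isIn "team member 1" (PySem.Str.lower roll_col_name) <;>
        cases PySem.Str.isIn "member 1" (PySem.Str.lower roll_col_name) <;>
        cases h != roll_col_name <;> rfl]
    exact find?_const_and _ _ _
  have e2 : (PySem.List.dedup (record.map Prod.fst)).find?
      (pvQ2 (PySem.Str.isIn "team member 2" (PySem.Str.lower roll_col_name) ||
             PySem.Str.isIn "member 2" (PySem.Str.lower roll_col_name)) roll_col_name)
      = if PySem.Str.isIn "team member 2" (PySem.Str.lower roll_col_name) ||
           PySem.Str.isIn "member 2" (PySem.Str.lower roll_col_name) then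
          (PySem.List.dedup (record.map Prod.fst)).find? (fun h =>
            PySem.Str.isIn "member 2" (PySem.Str.lower h) &&
            PySem.Str.isIn "name" (PySem.Str.lower h) && h != roll_col_name)
        else none := by
    rw [show pvQ2 (PySem.Str.isIn "team member 2" (PySem.Str.lower roll_col_name) ||
             PySem.Str.isIn "member 2" (PySem.Str.lower roll_col_name)) roll_col_name
        = (fun h => (PySem.Str.isIn "team member 2" (PySem.Str.lower roll_col_name) ||
             PySem.Str.isIn "member 2" (PySem.Str.lower roll_col_name)) &&
            (PySem.Str.isIn "member 2" (PySem.Str.lower h) &&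
             PySem.Str.isIn "name" (PySem.Str.lower h) && h != roll_col_name)) from
      funext fun h => by unfold pvQ2; cases PySem.Str.isIn "name" (PySem.Str.lower h) <;>
        cases PySem.Str.isIn "member 2" (PySem.Str.lower h) <;>
        cases PySem.Str.isIn "team member 2" (PySem.Str.lower roll_col_name) <;>
        cases PySem.Str.isIn "member 2" (PySem.Str.lower roll_col_name) <;>
        cases h != roll_col_name <;> rfl]
    exact find?_const_and _ _ _
  have e4 : (PySem.List.dedup (record.map Prod.fst)).find? pvQ4
      = (PySem.List.dedup (record.map Prod.fst)).find? (fun h =>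
          PySem.Str.isIn "name" (PySem.Str.lower h) &&
          !PySem.Str.isIn "team" (PySem.Str.lower h) && !PySem.Str.isIn "file" (PySem.Str.lower h)) := by
    rw [show pvQ4 = (fun h : String =>
          PySem.Str.isIn "name" (PySem.Str.lower h) &&
          !PySem.Str.isIn "team" (PySem.Str.lower h) && !PySem.Str.isIn "file" (PySem.Str.lower h)) from
      funext fun h => by unfold pvQ4; cases PySem.Str.isIn "name" (PySem.Str.lower h) <;>
        cases PySem.Str.isIn "team" (PySem.Str.lower h) <;>
        cases PySem.Str.isIn "file" (PySem.Str.lower h) <;> rfl]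
  rw [e0, e1, e2, e4]
  rfl
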